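-- pv_equiv track=rewrite | github.com/datacrood/fmcg-deal-newsletter-agent | pipeline/ingest.py | _url_dedup
-- ===== SOURCE A (Python) =====
-- def _url_dedup(articles: list[dict]) -> list[dict]:
--     """Deduplicate by URL, keeping the version with the longest content."""
--     best: dict[str, dict] = {}
--     no_url = []
--     for art in articles:
--         url = art.get("url", "")
--         if not url:
--             no_url.append(art)
--             continue
--         existing = best.get(url)
--         if not existing or len(art.get("content", "")) > len(existing.get("content", "")):
--             best[url] = art
--     return list(best.values()) + no_url
-- ===== SOURCE B (Python) =====
-- def _url_dedup(articles: list[dict]) -> list[dict]: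
--     """Deduplicate by URL, keeping the version with the longest content."""
--     urls = []
--     for art in articles:
--         u = art.get("url", "")
--         if u and u not in urls:
--             urls.append(u)
--
--     def winner(u):
--         best = None
--         for art in articles:
--             if art.get("url", "") == u:
--                 if best is None or len(art.get("content", "")) > len(best.get("content", "")):
--                     best = art
--         return best
--
--     return [winner(u) for u in urls] + [a for a in articles if not a.get("url", "")]
-- ===== Notes on version B (the rewrite author's own statement) =====
-- stated objective: alternative
-- what changed: Replaces A's single online pass with a dict of per-url best-so-far by a dict-free staged computation: one pass collects the distinct nonempty urls in first-seen order, then for each url a fresh scan of the whole list picks the first article of maximal content length (same strict '>' tie-break), and a final filter collects url-less articles.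
import Mathlib
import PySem

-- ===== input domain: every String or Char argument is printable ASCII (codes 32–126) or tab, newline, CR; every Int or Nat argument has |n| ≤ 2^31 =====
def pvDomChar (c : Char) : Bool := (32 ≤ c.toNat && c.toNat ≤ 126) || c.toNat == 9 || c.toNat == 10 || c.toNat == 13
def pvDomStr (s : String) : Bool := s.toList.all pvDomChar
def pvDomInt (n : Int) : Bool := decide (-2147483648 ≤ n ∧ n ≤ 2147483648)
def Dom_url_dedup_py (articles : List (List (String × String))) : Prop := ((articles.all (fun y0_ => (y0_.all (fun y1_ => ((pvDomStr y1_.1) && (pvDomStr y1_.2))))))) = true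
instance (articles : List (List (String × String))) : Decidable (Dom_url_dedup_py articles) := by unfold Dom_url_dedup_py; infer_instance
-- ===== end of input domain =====

-- B replaces A's single online pass holding a per-url best dict by a dict-free staged
-- computation: collect distinct urls first-seen, then rescan per url for the first
-- longest-content article, then filter url-less ones ('alternative': different algorithm).

-- shared helper: Python's art.get(k, "") on the association-list representation of an article
def pvGet (a : List (String × String)) (k : String) : String :=
  (PySem.Dict.mk a).getD k ""

-- ===== PORT A =====
-- loop body of A: fold state is (best, no_url)
def pvStepA (st : PySem.Dict String (List (String × String)) × List (List (String × String)))
    (art : List (String × String)) :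
    PySem.Dict String (List (String × String)) × List (List (String × String)) :=
  let url := pvGet art "url"
  if url = "" then (st.1, st.2 ++ [art])
  else
    match st.1.get? url with
    -- every article stored in `best` has a nonempty "url" entry, hence is a nonempty
    -- dict, so Python's falsiness test `not existing` fires exactly when get? is none
    | none => (st.1.insert url art, st.2)
    | some existing =>
      if PySem.Str.len (pvGet existing "content") < PySem.Str.len (pvGet art "content") then
        (st.1.insert url art, st.2)
      else (st.1, st.2)

def url_dedup_py (articles : List (List (String × String))) : List (List (String × String)) :=
  let st := articles.foldl pvStepA (PySem.Dict.empty, [])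
  st.1.values ++ st.2

-- ===== PORT B =====
-- first loop of B: the distinct nonempty urls in first-seen order
def pvUrlsB (articles : List (List (String × String))) : List String :=
  articles.foldl (fun acc art =>
    let u := pvGet art "url"
    if u ≠ "" ∧ u ∉ acc then acc ++ [u] else acc) []

-- inner `if best is None or len(...) > len(...)` of B's winner loop
def pvUpdB (best : Option (List (String × String))) (art : List (String × String)) :
    Option (List (String × String)) :=
  match best with
  | none => some art
  | some e =>
    if PySem.Str.len (pvGet e "content") < PySem.Str.len (pvGet art "content") then some art
    else some e

-- B's `winner(u)`: rescan the whole list keeping the first longest-content match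
def pvWinnerB (articles : List (List (String × String))) (u : String) :
    Option (List (String × String)) :=
  articles.foldl (fun best art => if pvGet art "url" = u then pvUpdB best art else best) none

def url_dedup_py_alt (articles : List (List (String × String))) : List (List (String × String)) :=
  -- `.getD []` renders Python's None; unreachable since every u ∈ urls has a matching article
  (pvUrlsB articles).map (fun u => (pvWinnerB articles u).getD [])
    ++ articles.filter (fun a => pvGet a "url" = "")

-- ===== PRECONDITION & SPEC =====
def Spec_url_dedup_py (articles : List (List (String × String))) (out : List (List (String × String))) : Prop := out = url_dedup_py_alt articles
instance (articles : List (List (String × String))) (out : List (List (String × String))) : Decidable (Spec_url_dedup_py articles out) := by unfold Spec_url_dedup_py; infer_instance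

-- ===== CLAIM (what is proved, stated in full; the proofs are below) =====
def Claim_equal_url_dedup_py : Prop := ∀ (articles : List (List (String × String))), Dom_url_dedup_py articles → Spec_url_dedup_py articles (url_dedup_py articles)

-- ===== LEMMAS AND PROOFS =====

-- every collected url is nonempty
theorem pvUrlsB_ne (xs : List (List (String × String))) :
    ∀ acc, (∀ v ∈ acc, v ≠ "") →
      ∀ u ∈ xs.foldl (fun acc art =>
          let u := pvGet art "url"
          if u ≠ "" ∧ u ∉ acc then acc ++ [u] else acc) acc, u ≠ "" := by
  induction xs with
  | nil => intro acc h u hu; exact h u hu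
  | cons a rest ih =>
    intro acc h u hu
    simp only [List.foldl_cons] at hu
    by_cases hc : pvGet a "url" ≠ "" ∧ pvGet a "url" ∉ acc
    · refine ih (acc ++ [pvGet a "url"]) ?_ u (by simpa [hc] using hu)
      intro v hv
      rcases List.mem_append.mp hv with h1 | h2
      · exact h v h1
      · simp at h2; subst h2; exact hc.1
    · exact ih acc h u (by simpa [hc] using hu)

-- snoc forms of B's three stages
theorem pvUrlsB_snoc (xs : List (List (String × String))) (a : List (String × String)) :
    pvUrlsB (xs ++ [a]) =
      if pvGet a "url" ≠ "" ∧ pvGet a "url" ∉ pvUrlsB xs then pvUrlsB xs ++ [pvGet a "url"]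
      else pvUrlsB xs := by
  simp [pvUrlsB, List.foldl_append]

theorem pvWinnerB_snoc (xs : List (List (String × String))) (a : List (String × String))
    (u : String) :
    pvWinnerB (xs ++ [a]) u =
      if pvGet a "url" = u then pvUpdB (pvWinnerB xs u) a else pvWinnerB xs u := by
  simp [pvWinnerB, List.foldl_append]

-- the characterization of A's fold in B's vocabulary, by right induction
theorem pvCharA (xs : List (List (String × String))) :
    (xs.foldl pvStepA (PySem.Dict.empty, [])).2
        = xs.filter (fun a => pvGet a "url" = "")
    ∧ (xs.foldl pvStepA (PySem.Dict.empty, [])).1.keys = pvUrlsB xs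
    ∧ (xs.foldl pvStepA (PySem.Dict.empty, [])).1.keys.Nodup
    ∧ (∀ u, u ≠ "" → (xs.foldl pvStepA (PySem.Dict.empty, [])).1.get? u = pvWinnerB xs u) := by
  induction xs using List.reverseRecOn with
  | nil =>
    refine ⟨rfl, rfl, PySem.Dict.nodup_keys_empty, ?_⟩
    intro u _; simp [pvWinnerB, PySem.Dict.get?_empty]
  | append_singleton xs a ih =>
    obtain ⟨h2, hk, hnd, hg⟩ := ih
    rw [List.foldl_append, List.foldl_cons, List.foldl_nil]
    set st := xs.foldl pvStepA (PySem.Dict.empty, []) with hst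
    by_cases hu : pvGet a "url" = ""
    · have ha : pvStepA st a = (st.1, st.2 ++ [a]) := by simp [pvStepA, hu]
      rw [ha]
      refine ⟨?_, ?_, hnd, ?_⟩
      · simp [List.filter_append, hu, h2]
      · rw [pvUrlsB_snoc, hk]; simp [hu]
      · intro u hune
        rw [pvWinnerB_snoc]
        simp only [hu]
        rw [if_neg (fun h => hune h.symm)]
        exact hg u hune
    · have hfilt : (xs ++ [a]).filter (fun a => pvGet a "url" = "")
          = xs.filter (fun a => pvGet a "url" = "") := by
        simp [List.filter_append, hu]
      cases hget : st.1.get? (pvGet a "url") with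
      | none =>
        have hcont : st.1.contains (pvGet a "url") = false :=
          (PySem.Dict.get?_eq_none_iff_contains st.1 _).mp hget
        have hmem : pvGet a "url" ∉ pvUrlsB xs := by
          rw [← hk]
          intro hm
          rw [(PySem.Dict.contains_iff_mem_keys st.1 (pvGet a "url")).mpr hm] at hcont
          cases hcont
        have ha : pvStepA st a = (st.1.insert (pvGet a "url") a, st.2) := by
          simp [pvStepA, hu, hget]
        rw [ha]
        refine ⟨by simpa [hfilt] using h2, ?_, ?_, ?_⟩
        · rw [PySem.Dict.keys_insert_of_not_contains st.1 _ hcont, hk, pvUrlsB_snoc,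
            if_pos ⟨hu, hmem⟩]
        · exact PySem.Dict.nodup_keys_insert st.1 _ _ hnd
        · intro u hune
          rw [pvWinnerB_snoc]
          by_cases huv : pvGet a "url" = u
          · subst huv
            rw [if_pos rfl, PySem.Dict.get?_insert_self, ← hg _ hu, hget]
            rfl
          · rw [if_neg huv, PySem.Dict.get?_insert_of_ne st.1 a (fun h => huv h.symm)]
            exact hg u hune
      | some e =>
        have ha : pvStepA st a =
            (if PySem.Str.len (pvGet e "content") < PySem.Str.len (pvGet a "content") then
              (st.1.insert (pvGet a "url") a, st.2) else (st.1, st.2)) := by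
          simp [pvStepA, hu, hget]
        have hcont : st.1.contains (pvGet a "url") = true := by
          cases hc : st.1.contains (pvGet a "url") with
          | false => rw [(PySem.Dict.get?_eq_none_iff_contains st.1 _).mpr hc] at hget; cases hget
          | true => rfl
        have hmem : pvGet a "url" ∈ pvUrlsB xs := by
          rw [← hk]; exact (PySem.Dict.contains_iff_mem_keys st.1 _).mp hcont
        have hurls : pvUrlsB (xs ++ [a]) = pvUrlsB xs := by
          rw [pvUrlsB_snoc]; simp [hmem]
        by_cases hlt : PySem.Str.len (pvGet e "content") < PySem.Str.len (pvGet a "content")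
        · rw [ha, if_pos hlt]
          refine ⟨by simpa [hfilt] using h2, ?_, ?_, ?_⟩
          · rw [PySem.Dict.keys_insert_of_contains st.1 a hcont, hk, hurls]
          · rw [PySem.Dict.keys_insert_of_contains st.1 a hcont]; exact hnd
          · intro u hune
            rw [pvWinnerB_snoc]
            by_cases huv : pvGet a "url" = u
            · subst huv
              rw [if_pos rfl, PySem.Dict.get?_insert_self, ← hg _ hu, hget]
              simp only [pvUpdB]
              rw [if_pos hlt]
            · rw [if_neg huv, PySem.Dict.get?_insert_of_ne st.1 a (fun h => huv h.symm)]
              exact hg u hune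
        · rw [ha, if_neg hlt]
          refine ⟨by simpa [hfilt] using h2, by rw [hk, hurls], hnd, ?_⟩
          intro u hune
          rw [pvWinnerB_snoc]
          by_cases huv : pvGet a "url" = u
          · subst huv
            rw [if_pos rfl, ← hg _ hu, hget]
            simp only [pvUpdB]
            rw [if_neg hlt]
          · rw [if_neg huv]
            exact hg u hune

-- ===== VERDICT (by name: the statement is the Claim_ definition above) =====
theorem url_dedup_py_spec : Claim_equal_url_dedup_py := by
  intro articles _
  unfold Spec_url_dedup_py url_dedup_py url_dedup_py_alt
  obtain ⟨h2, hk, hnd, hg⟩ := pvCharA articles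
  show (articles.foldl pvStepA (PySem.Dict.empty, [])).1.values
      ++ (articles.foldl pvStepA (PySem.Dict.empty, [])).2 = _
  rw [h2, PySem.Dict.values_eq_map_keys _ hnd [], hk]
  congr 1
  refine List.map_congr_left ?_
  intro u hu
  have hune : u ≠ "" := pvUrlsB_ne articles [] (by simp) u hu
  rw [PySem.Dict.getD_eq_get?_getD, hg u hune]
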